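-- pv_equiv track=rewrite | github.com/Who-Code/AdventOfCode2025 | Solutions/day_4_roll_solver.py | _accessible_positions
-- ===== SOURCE A (Python) =====
-- DIRECTIONS = [
--     (-1, -1), (-1, 0), (-1, 1),
--     (0, -1),           (0, 1),
--     (1, -1),  (1, 0),  (1, 1),
-- ]
--
-- def _accessible_positions(grid):
--     if not grid:
--         return
--
--     rows = len(grid)
--     cols = len(grid[0]) if rows else 0
--     for r in range(rows):
--         for c in range(cols):
--             if grid[r][c] != "@":
--                 continue
--             nearby = 0
--             for dr, dc in DIRECTIONS:
--                 nr = r + dr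
--                 nc = c + dc
--                 if 0 <= nr < rows and 0 <= nc < cols and grid[nr][nc] == "@":
--                     nearby += 1
--             if nearby < 4:
--                 yield (r, c)
-- ===== SOURCE B (Python) =====
-- DIRECTIONS = [
--     (-1, -1), (-1, 0), (-1, 1),
--     (0, -1),           (0, 1),
--     (1, -1),  (1, 0),  (1, 1),
-- ]
--
-- def _accessible_positions(grid):
--     if not grid:
--         return
--     cols = len(grid[0])
--     ats = [(r, c) for r, row in enumerate(grid)
--                   for c, cell in enumerate(row[:cols]) if cell == "@"]
--     counts = {}
--     for p in ats:
--         for d in DIRECTIONS: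
--             q = (p[0] + d[0], p[1] + d[1])
--             counts[q] = counts.get(q, 0) + 1
--     for p in ats:
--         if counts.get(p, 0) < 4:
--             yield p
-- ===== Notes on version B (the rewrite author's own statement) =====
-- stated objective: alternative
-- what changed: Replaces A's per-cell gather (each '@' cell re-inspects its 8 neighbours with bounds checks) by a scatter algorithm: enumerate the grid once to collect the row-major '@' coordinates, scatter +1 into a neighbour-count dict at all 8 neighbours of each '@' cell with no bounds check (out-of-grid keys are never read back), then emit the collected coordinates whose count is below 4.
import Mathlib
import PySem

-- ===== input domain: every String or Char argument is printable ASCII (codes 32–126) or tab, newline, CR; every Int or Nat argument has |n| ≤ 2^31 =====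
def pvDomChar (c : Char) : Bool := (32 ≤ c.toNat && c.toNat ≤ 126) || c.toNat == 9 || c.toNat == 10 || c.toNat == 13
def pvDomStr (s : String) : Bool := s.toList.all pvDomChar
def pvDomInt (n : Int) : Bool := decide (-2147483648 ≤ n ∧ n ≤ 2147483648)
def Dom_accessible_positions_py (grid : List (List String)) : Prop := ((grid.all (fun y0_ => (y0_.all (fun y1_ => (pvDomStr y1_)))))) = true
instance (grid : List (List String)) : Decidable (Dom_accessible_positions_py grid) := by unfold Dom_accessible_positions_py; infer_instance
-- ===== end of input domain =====

-- B replaces A's per-cell gather of the 8 neighbours (with bounds checks) by a scatter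
-- algorithm: enumerate the grid once into the row-major '@' coordinate list, scatter +1
-- into a neighbour-count dict at all 8 neighbours of each '@' cell (no bounds check:
-- out-of-grid keys are never read back), then emit the coordinates with count < 4
-- (alternative decomposition, similar cost).

-- ===== PORT A =====
-- module constant DIRECTIONS (shared by the two Pythons)
def pvDirs : List (Int × Int) :=
  [(-1, -1), (-1, 0), (-1, 1), (0, -1), (0, 1), (1, -1), (1, 0), (1, 1)]

-- grid[r][c]; the default "" is never read on inputs admitted by Pre_ (indices are in range there)
def pvCell (grid : List (List String)) (r c : Int) : String :=
  PySem.List.pyGetD (PySem.List.pyGetD grid r []) c ""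

def accessible_positions_py (grid : List (List String)) : List (Int × Int) :=
  if grid = [] then []
  else
    let rows : Int := (grid.length : Int)
    let cols : Int := if rows ≠ 0 then ((PySem.List.pyGetD grid 0 []).length : Int) else 0
    (PySem.List.pyRange 0 rows 1).foldl (fun out r =>
      (PySem.List.pyRange 0 cols 1).foldl (fun out c =>
        if pvCell grid r c ≠ "@" then out
        else
          let nearby : Int := pvDirs.foldl (fun nearby d =>
            let nr := r + d.1
            let nc := c + d.2
            if 0 ≤ nr ∧ nr < rows ∧ 0 ≤ nc ∧ nc < cols ∧ pvCell grid nr nc = "@" then nearby + 1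
            else nearby) 0
          if nearby < 4 then out ++ [(r, c)] else out) out) []

-- ===== PORT B =====
def accessible_positions_py_alt (grid : List (List String)) : List (Int × Int) :=
  if grid = [] then []
  else
    let cols : Int := ((PySem.List.pyGetD grid 0 []).length : Int)
    -- ats = [(r, c) for r, row in enumerate(grid) for c, cell in enumerate(row[:cols]) if cell == "@"]
    let ats : List (Int × Int) :=
      (PySem.List.enumerate grid).flatMap (fun rrow =>
        ((PySem.List.enumerate (PySem.List.slice rrow.2 none (some cols))).filter
          (fun ccell => decide (ccell.2 = "@"))).map (fun ccell => (rrow.1, ccell.1)))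
    let counts : PySem.Dict (Int × Int) Int :=
      ats.foldl (fun d p =>
        pvDirs.foldl (fun d dd =>
          d.insert (p.1 + dd.1, p.2 + dd.2) (d.getD (p.1 + dd.1, p.2 + dd.2) 0 + 1)) d)
        PySem.Dict.empty
    ats.filter (fun p => decide (counts.getD p 0 < 4))

-- ===== PRECONDITION & SPEC =====
-- Pre_ excludes exactly the ragged grids on which the Python A raises IndexError: when some
-- row is shorter than the first row, column len(row) < cols is indexed in it by A.
def Pre_accessible_positions_py (grid : List (List String)) : Prop :=
  ∀ row ∈ grid, (grid.headD []).length ≤ row.length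
instance (grid : List (List String)) : Decidable (Pre_accessible_positions_py grid) := by
  unfold Pre_accessible_positions_py; infer_instance

def pvWitness_accessible_positions_py : List (List String) := [["@", "."], [".", "@"]]

def Spec_accessible_positions_py (grid : List (List String)) (out : List (Int × Int)) : Prop := out = accessible_positions_py_alt grid
instance (grid : List (List String)) (out : List (Int × Int)) : Decidable (Spec_accessible_positions_py grid out) := by unfold Spec_accessible_positions_py; infer_instance

-- ===== CLAIM (what is proved, stated in full; the proofs are below) =====
def Claim_equal_accessible_positions_py : Prop := ∀ (grid : List (List String)), Dom_accessible_positions_py grid → Pre_accessible_positions_py grid → Spec_accessible_positions_py grid (accessible_positions_py grid)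

-- ===== LEMMAS AND PROOFS =====

-- the multiset of coordinates B's scatter pass increments, in scatter order
def pvKeys (grid : List (List String)) (rows cols : Int) : List (Int × Int) :=
  (PySem.List.pyRange 0 rows 1).flatMap (fun r =>
    (PySem.List.pyRange 0 cols 1).flatMap (fun c =>
      (pvDirs.filter (fun _ => decide (pvCell grid r c = "@"))).map
        (fun dd => (r + dd.1, c + dd.2))))

lemma pv_sum_point (x : Int) (f : Int → Int) :
    ∀ (n : Nat) (a : Int),
      ((PySem.List.pyRange a (a + n) 1).map (fun i => if i = x then f i else 0)).sum
        = if a ≤ x ∧ x < a + n then f x else 0 := by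
  intro n
  induction n with
  | zero =>
    intro a
    rw [PySem.List.pyRange_one_eq_nil (by simp)]
    simp only [List.map_nil, List.sum_nil]
    rw [if_neg (by omega)]
  | succ n ih =>
    intro a
    rw [PySem.List.pyRange_one_cons (by push_cast; omega)]
    simp only [List.map_cons, List.sum_cons]
    have h2 : a + ((n + 1 : Nat) : Int) = (a + 1) + (n : Nat) := by push_cast; ring
    rw [h2, ih (a + 1)]
    by_cases hx : a = x
    · subst hx
      rw [if_pos rfl, if_neg (by omega), if_pos (by constructor <;> omega)]
      ring
    · rw [if_neg hx, zero_add]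
      exact if_congr (by omega) rfl rfl

lemma pv_sum_point' (a b x : Int) (f : Int → Int) :
    ((PySem.List.pyRange a b 1).map (fun i => if i = x then f i else 0)).sum
      = if a ≤ x ∧ x < b then f x else 0 := by
  by_cases h : b ≤ a
  · rw [PySem.List.pyRange_one_eq_nil h]
    simp only [List.map_nil, List.sum_nil]
    rw [if_neg (by omega)]
  · have hb : b = a + ((b - a).toNat : Int) := by omega
    rw [hb]; exact pv_sum_point x f _ a

lemma pv_sum_swap {α β : Type} (l : List α) (m : List β) (f : α → β → Int) :
    (l.map (fun x => (m.map (fun y => f x y)).sum)).sum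
      = (m.map (fun y => (l.map (fun x => f x y)).sum)).sum := by
  induction m with
  | nil => simp
  | cons b t ih =>
    simp only [List.map_cons, List.sum_cons, ← ih]
    rw [← PySem.List.sum_map_add_int]

lemma pv_out_shape (R C : Int) (p : Int → Int → Prop) [inst : ∀ r c, Decidable (p r c)] :
    (PySem.List.pyRange 0 R 1).foldl (fun out r =>
        (PySem.List.pyRange 0 C 1).foldl (fun out c =>
          if p r c then out ++ [(r, c)] else out) out) ([] : List (Int × Int))
      = (PySem.List.pyRange 0 R 1).flatMap (fun r =>
          ((PySem.List.pyRange 0 C 1).filter (fun c => decide (p r c))).map (fun c => (r, c))) := by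
  calc (PySem.List.pyRange 0 R 1).foldl (fun out r =>
        (PySem.List.pyRange 0 C 1).foldl (fun out c =>
          if p r c then out ++ [(r, c)] else out) out) ([] : List (Int × Int))
      = (PySem.List.pyRange 0 R 1).foldl (fun out r =>
          out ++ ((PySem.List.pyRange 0 C 1).filter (fun c => decide (p r c))).map (fun c => (r, c))) [] := by
        refine PySem.List.foldl_congr_mem _ _ _ _ (fun acc r _ => ?_)
        exact PySem.List.foldl_append_ite (p r) (fun c => (r, c)) _ acc
    _ = _ := by rw [PySem.List.foldl_append_eq_flatMap]; simp

lemma pv_sum_point2 (R C x y : Int) (P : Int → Int → Bool) :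
    ((PySem.List.pyRange 0 R 1).map (fun r =>
      ((PySem.List.pyRange 0 C 1).map (fun c =>
        if r = x ∧ c = y ∧ P r c then (1 : Int) else 0)).sum)).sum
      = if 0 ≤ x ∧ x < R ∧ 0 ≤ y ∧ y < C ∧ P x y then 1 else 0 := by
  have hin : ∀ r : Int,
      ((PySem.List.pyRange 0 C 1).map (fun c =>
        if r = x ∧ c = y ∧ P r c then (1 : Int) else 0)).sum
      = if r = x then (if 0 ≤ y ∧ y < C ∧ P r y then (1 : Int) else 0) else 0 := by
    intro r
    have e : (fun c => if r = x ∧ c = y ∧ P r c then (1 : Int) else 0)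
        = (fun c => if c = y then (if r = x ∧ P r c then (1 : Int) else 0) else 0) := by
      funext c; by_cases h1 : c = y <;> by_cases h2 : r = x <;> by_cases h3 : P r c <;> simp [h1, h2, h3]
    rw [e, pv_sum_point' 0 C y (fun c => if r = x ∧ P r c then (1 : Int) else 0)]
    by_cases hy : 0 ≤ y ∧ y < C <;> by_cases h2 : r = x <;> by_cases h3 : P r y <;>
      simp [hy, h2, h3]
    all_goals exact fun ha hb => absurd ⟨ha, hb⟩ hy
  simp only [hin]
  have e2 : (fun r => if r = x then (if 0 ≤ y ∧ y < C ∧ P r y then (1 : Int) else 0) else 0)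
      = (fun r => if r = x then ((fun r => if 0 ≤ y ∧ y < C ∧ P r y then (1 : Int) else 0) r) else 0) := rfl
  rw [e2, pv_sum_point' 0 R x]
  by_cases hx : 0 ≤ x ∧ x < R <;> by_cases hy : 0 ≤ y ∧ y < C <;> by_cases h3 : P x y <;>
    simp [hx, hy, h3]

lemma pv_flatMap_filter {α β : Type} (l : List α) (p : α → Bool) (h : α → List β) :
    (l.filter p).flatMap h = l.flatMap (fun x => if p x then h x else []) := by
  induction l with
  | nil => rfl
  | cons a t ih => by_cases hp : p a <;> simp [hp, ih]

-- B's enumerate-and-truncate pass produces the same row-major '@' list as index ranges do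
lemma pv_ats_eq (grid : List (List String)) (rows cols : Int)
    (hrows : rows = (grid.length : Int)) (hcols : 0 ≤ cols)
    (hlen : ∀ row ∈ grid, cols.toNat ≤ row.length) :
    (PySem.List.enumerate grid).flatMap (fun rrow =>
        ((PySem.List.enumerate (PySem.List.slice rrow.2 none (some cols))).filter
          (fun ccell => decide (ccell.2 = "@"))).map (fun ccell => (rrow.1, ccell.1)))
      = (PySem.List.pyRange 0 rows 1).flatMap (fun r =>
          ((PySem.List.pyRange 0 cols 1).filter (fun c => decide (pvCell grid r c = "@"))).map
            (fun c => (r, c))) := by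
  subst hrows
  rw [PySem.List.enumerate_eq_map_pyRange (d := [])]
  simp only [List.flatMap_def, List.map_map, Function.comp_def]
  refine congrArg List.flatten (List.map_congr_left (fun r hr => ?_))
  obtain ⟨hr0, hrlt⟩ := PySem.List.mem_pyRange_one.mp hr
  have hrlt' : r < (grid.length : Int) := by simpa using hrlt
  have hlenr : cols.toNat ≤ (PySem.List.pyGetD grid r []).length := by
    have hmem : PySem.List.pyGetD grid r [] ∈ grid :=
      PySem.List.pyGetD_mem grid [] (by simp [PySem.Raise.InRange]; omega)
    exact hlen _ hmem
  rw [PySem.List.slice_to _ hcols]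
  have hlt : PySem.List.len (List.take cols.toNat (PySem.List.pyGetD grid r [])) = cols := by
    rw [PySem.List.len_eq, List.length_take, min_eq_left hlenr]
    omega
  rw [PySem.List.enumerate_eq_map_pyRange (d := ""), hlt]
  simp only [List.filter_map, List.map_map, Function.comp_def]
  refine congrArg (List.map _) (List.filter_congr (fun c hc => ?_))
  obtain ⟨hc0, hclt⟩ := PySem.List.mem_pyRange_one.mp hc
  have hcn : c.toNat < cols.toNat := by omega
  have h1 : PySem.List.pyGetD ((PySem.List.pyGetD grid r []).take cols.toNat) c ""
      = (PySem.List.pyGetD grid r [])[c.toNat]'(by omega) := by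
    rw [PySem.List.pyGetD_eq_getElem _ _ hc0 (by rw [List.length_take]; push_cast; omega)]
    exact List.getElem_take
  have h2 : pvCell grid r c = (PySem.List.pyGetD grid r [])[c.toNat]'(by omega) := by
    unfold pvCell
    exact PySem.List.pyGetD_eq_getElem _ _ hc0 (by omega)
  simp only [h1, h2]

-- the dict B builds, read at any key, is the key's multiplicity in the scatter stream
lemma pv_counts_getD (grid : List (List String)) (rows cols : Int) (k : Int × Int) :
    ((((PySem.List.pyRange 0 rows 1).flatMap (fun r =>
        ((PySem.List.pyRange 0 cols 1).filter (fun c => decide (pvCell grid r c = "@"))).map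
          (fun c => (r, c)))).foldl (fun d p =>
        pvDirs.foldl (fun d dd =>
          d.insert (p.1 + dd.1, p.2 + dd.2) (d.getD (p.1 + dd.1, p.2 + dd.2) 0 + 1)) d)
        (PySem.Dict.empty : PySem.Dict (Int × Int) Int)).getD k 0)
      = ((pvKeys grid rows cols).count k : Int) := by
  have hcell : ∀ (d : PySem.Dict (Int × Int) Int) (p : Int × Int),
      pvDirs.foldl (fun d dd =>
        d.insert (p.1 + dd.1, p.2 + dd.2) (d.getD (p.1 + dd.1, p.2 + dd.2) 0 + 1)) d
      = (pvDirs.map (fun dd => (p.1 + dd.1, p.2 + dd.2))).foldl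
          (fun d kk => d.insert kk (d.getD kk 0 + 1)) d := by
    intro d p; rw [List.foldl_map]
  have hflat : ∀ (d : PySem.Dict (Int × Int) Int) (L : List (Int × Int))
      (g : Int × Int → List (Int × Int)),
      L.foldl (fun d p => (g p).foldl (fun d kk => d.insert kk (d.getD kk 0 + 1)) d) d
        = (L.flatMap g).foldl (fun d kk => d.insert kk (d.getD kk 0 + 1)) d := by
    intro d L g
    rw [List.flatMap, List.foldl_flatten, List.foldl_map]
  have hats : ((PySem.List.pyRange 0 rows 1).flatMap (fun r =>
        ((PySem.List.pyRange 0 cols 1).filter (fun c => decide (pvCell grid r c = "@"))).map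
          (fun c => (r, c)))).flatMap (fun p : Int × Int =>
        pvDirs.map (fun dd => (p.1 + dd.1, p.2 + dd.2)))
      = pvKeys grid rows cols := by
    rw [List.flatMap_assoc]
    unfold pvKeys
    refine congrArg (fun f => List.flatMap f (PySem.List.pyRange 0 rows 1)) (funext (fun r => ?_))
    rw [List.flatMap_map, pv_flatMap_filter]
    refine congrArg (fun f => List.flatMap f (PySem.List.pyRange 0 cols 1)) (funext (fun c => ?_))
    by_cases h : pvCell grid r c = "@" <;> simp [h]
  calc _ = ((pvKeys grid rows cols).foldl
        (fun d kk => d.insert kk (d.getD kk 0 + 1))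
        (PySem.Dict.empty : PySem.Dict (Int × Int) Int)).getD k 0 := by
        congr 1
        refine Eq.trans (PySem.List.foldl_congr_mem _ _ _ _ (fun d p _ => hcell d p)) ?_
        rw [hflat, hats]
    _ = _ := by
        rw [PySem.Dict.getD_foldl_insert_add_one, PySem.Dict.getD_empty, zero_add]

-- negating the direction list reverses it
lemma pv_dirs_neg : pvDirs.map (fun dd => (-dd.1, -dd.2)) = pvDirs.reverse := by decide

-- one scatter direction's contribution over the whole rectangle is a point mass at (r-a, c-b)
lemma pv_scatter_dir (rows cols r c a b : Int) (Q : Int → Int → Bool) :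
    ((PySem.List.pyRange 0 rows 1).map (fun r' =>
      ((PySem.List.pyRange 0 cols 1).map (fun c' =>
        if (((r' + a, c' + b) : Int × Int) == (r, c)) && Q r' c'
          then (1 : Int) else 0)).sum)).sum
      = if 0 ≤ r - a ∧ r - a < rows ∧ 0 ≤ c - b ∧ c - b < cols ∧ Q (r - a) (c - b) then 1 else 0 := by
  have e : ∀ r' c' : Int,
      ((((r' + a, c' + b) : Int × Int) == (r, c)) && Q r' c') = true
      ↔ (r' = r - a ∧ c' = c - b ∧ Q r' c' = true) := by
    intro r' c'
    simp only [Bool.and_eq_true, beq_iff_eq, Prod.mk.injEq]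
    constructor
    · rintro ⟨⟨e1, e2⟩, hq⟩; exact ⟨by omega, by omega, hq⟩
    · rintro ⟨e1, e2, hq⟩; subst e1; subst e2
      exact ⟨⟨by omega, by omega⟩, hq⟩
  simp only [e]
  exact pv_sum_point2 rows cols (r - a) (c - b) Q

lemma pv_cast_sum (l : List Nat) : ((l.sum : Nat) : Int) = (l.map (Nat.cast : Nat → Int)).sum :=
  Nat.cast_list_sum l

-- the scatter multiplicity at any key equals A's gather count there
lemma pv_count_keys (grid : List (List String)) (rows cols : Int) (k : Int × Int) :
    (((pvKeys grid rows cols).count k : Nat) : Int)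
      = pvDirs.foldl (fun nearby dd =>
          if 0 ≤ k.1 + dd.1 ∧ k.1 + dd.1 < rows ∧ 0 ≤ k.2 + dd.2 ∧ k.2 + dd.2 < cols ∧
              pvCell grid (k.1 + dd.1) (k.2 + dd.2) = "@" then nearby + 1 else nearby) 0 := by
  obtain ⟨r, c⟩ := k
  rw [PySem.List.foldl_ite_add_one
    (p := fun dd : Int × Int => 0 ≤ r + dd.1 ∧ r + dd.1 < rows ∧ 0 ≤ c + dd.2 ∧ c + dd.2 < cols ∧
      pvCell grid (r + dd.1) (c + dd.2) = "@"), zero_add]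
  rw [← PySem.List.sum_map_ite_one_zero]
  simp only [pvKeys, List.count, List.flatMap_def, List.countP_flatten, List.map_map,
    Function.comp_def, List.countP_map, List.countP_filter]
  rw [pv_cast_sum]
  simp only [List.map_map, Function.comp_def, pv_cast_sum]
  simp only [← PySem.List.sum_map_ite_one_zero]
  simp only [show ∀ x : Int, ((PySem.List.pyRange 0 cols 1).map (fun x_1 =>
        (pvDirs.map (fun a => if ((x + a.1, x_1 + a.2) == ((r, c) : Int × Int)) &&
          decide (pvCell grid x x_1 = "@")
          then (1 : Int) else 0)).sum)).sum
      = (pvDirs.map (fun a => ((PySem.List.pyRange 0 cols 1).map (fun x_1 =>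
          if ((x + a.1, x_1 + a.2) == ((r, c) : Int × Int)) &&
          decide (pvCell grid x x_1 = "@")
          then (1 : Int) else 0)).sum)).sum from
    fun x => pv_sum_swap _ _ _]
  rw [pv_sum_swap (PySem.List.pyRange 0 rows 1) pvDirs]
  have hdir : ∀ dd : Int × Int,
      ((PySem.List.pyRange 0 rows 1).map (fun r' =>
        ((PySem.List.pyRange 0 cols 1).map (fun c' =>
          if (((r' + dd.1, c' + dd.2) : Int × Int) == (r, c)) &&
              decide (pvCell grid r' c' = "@")
            then (1 : Int) else 0)).sum)).sum
      = if 0 ≤ r - dd.1 ∧ r - dd.1 < rows ∧ 0 ≤ c - dd.2 ∧ c - dd.2 < cols ∧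
            decide (pvCell grid (r - dd.1) (c - dd.2) = "@") then (1 : Int) else 0 :=
    fun dd => pv_scatter_dir rows cols r c dd.1 dd.2
      (fun r' c' => decide (pvCell grid r' c' = "@"))
  simp only [hdir]
  have flip : ∀ g : Int × Int → Int,
      (pvDirs.map g).sum = (pvDirs.map (fun dd => g (-dd.1, -dd.2))).sum := by
    intro g
    have h : pvDirs.map (fun dd => g (-dd.1, -dd.2))
        = (pvDirs.map (fun dd : Int × Int => (-dd.1, -dd.2))).map g := by rw [List.map_map]; rfl
    rw [h, pv_dirs_neg, List.map_reverse, List.sum_reverse]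
  rw [flip]
  simp only [sub_neg_eq_add, decide_eq_true_eq]

-- ===== VERDICT (by name: the statement is the Claim_ definition above) =====
theorem accessible_positions_py_spec : Claim_equal_accessible_positions_py := by
  intro grid _ hpre
  unfold Spec_accessible_positions_py
  by_cases hg : grid = []
  · rw [hg]; rfl
  · rw [accessible_positions_py, accessible_positions_py_alt, if_neg hg, if_neg hg]
    simp only []
    have hlen0 : ((grid.length : Int)) ≠ 0 := by
      have h : grid.length ≠ 0 := fun h => hg (List.length_eq_zero_iff.mp h)
      exact_mod_cast h
    rw [if_pos hlen0]
    have hhead : PySem.List.pyGetD grid 0 [] = grid.headD [] := by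
      cases grid with
      | nil => exact absurd rfl hg
      | cons g gs => simp [PySem.List.pyGetD_zero]
    have hl : ∀ row ∈ grid,
        (((PySem.List.pyGetD grid 0 []).length : Int)).toNat ≤ row.length := by
      intro row h
      have := hpre row h
      rw [hhead]
      simpa using this
    rw [pv_ats_eq grid (grid.length : Int) ((PySem.List.pyGetD grid 0 []).length : Int) rfl
      (Int.natCast_nonneg _) hl]
    simp only [pv_counts_getD grid (grid.length : Int) ((PySem.List.pyGetD grid 0 []).length : Int)]
    simp only [pv_count_keys grid (grid.length : Int) ((PySem.List.pyGetD grid 0 []).length : Int)]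
    have eA := pv_out_shape (grid.length : Int) ((PySem.List.pyGetD grid 0 []).length : Int)
      (fun r c => pvCell grid r c = "@" ∧ pvDirs.foldl (fun nearby d =>
        if 0 ≤ r + d.1 ∧ r + d.1 < (grid.length : Int) ∧ 0 ≤ c + d.2 ∧
            c + d.2 < ((PySem.List.pyGetD grid 0 []).length : Int) ∧
            pvCell grid (r + d.1) (c + d.2) = "@" then nearby + 1 else nearby) (0 : Int) < 4)
    refine Eq.trans (Eq.trans ?_ eA) ?_
    · refine PySem.List.foldl_congr_mem _ _ _ _ (fun out r _ => ?_)
      refine PySem.List.foldl_congr_mem _ _ _ _ (fun out' c _ => ?_)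
      by_cases hcell : pvCell grid r c = "@" <;>
        by_cases hn : pvDirs.foldl (fun nearby d =>
            if 0 ≤ r + d.1 ∧ r + d.1 < (grid.length : Int) ∧ 0 ≤ c + d.2 ∧
                c + d.2 < ((PySem.List.pyGetD grid 0 []).length : Int) ∧
                pvCell grid (r + d.1) (c + d.2) = "@" then nearby + 1 else nearby) (0 : Int) < 4 <;>
        simp [hcell, hn]
    · simp only [List.flatMap_def, List.filter_flatten, List.map_map, Function.comp_def,
        List.filter_map, List.filter_filter]
      refine congrArg List.flatten (List.map_congr_left (fun r hr => ?_))
      refine congrArg (List.map _) (List.filter_congr (fun c hc => ?_))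
      simp only [Bool.decide_and]
      rw [Bool.and_comm]
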